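-- pv_equiv track=rewrite | github.com/thaheer-uzamaki/Code | Letter capital.py | letter_capitalization
-- ===== SOURCE A (Python) =====
-- def letter_capitalization(string):
--     res=string.title()
--     token='abcd'
--     result=res+token
--     res_list=list(result)
--     for i in range(3,len(result),4):
--         res_list[i]='-'
--     result=''.join(res_list)
--     return result
-- ===== SOURCE B (Python) =====
-- def letter_capitalization(string):
--     s = string.title() + 'abcd'
--     parts = []
--     i = 0
--     while i + 4 <= len(s):
--         parts.append(s[i:i + 3])
--         parts.append('-')
--         i += 4
--     parts.append(s[i:])
--     return ''.join(parts)
-- ===== Notes on version B (the rewrite author's own statement) =====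
-- stated objective: alternative
-- what changed: B builds the title-cased string plus token once and consumes it in fixed blocks of four (keep 3 chars, emit '-'), instead of A's list conversion plus an index loop over range(3,len,4) mutating every 4th slot.
import Mathlib
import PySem

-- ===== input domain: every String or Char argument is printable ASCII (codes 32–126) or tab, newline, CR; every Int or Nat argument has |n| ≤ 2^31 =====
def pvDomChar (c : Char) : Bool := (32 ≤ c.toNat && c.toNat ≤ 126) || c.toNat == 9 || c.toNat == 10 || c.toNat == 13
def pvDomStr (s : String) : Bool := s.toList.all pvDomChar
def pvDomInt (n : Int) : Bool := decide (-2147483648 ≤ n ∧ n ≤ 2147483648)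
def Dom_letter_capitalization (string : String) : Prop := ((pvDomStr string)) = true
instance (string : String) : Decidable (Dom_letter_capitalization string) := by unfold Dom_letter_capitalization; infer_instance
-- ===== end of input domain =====

-- B consumes the combined string in blocks of four instead of A's index loop mutating a list (alternative decomposition, same cost).

-- ===== PORT A =====
-- str.title() on the ASCII domain: a letter after a letter is lowercased, a letter after a non-letter uppercased (exact on Dom).
def pvTitleChars : Bool → List Char → List Char
  | _, [] => []
  | prev, c :: rest =>
    if PySem.Chars.isalpha c then
      (if prev then PySem.Chars.lowerChar c else PySem.Chars.upperChar c) :: pvTitleChars true rest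
    else c :: pvTitleChars false rest

def pvTitle (s : String) : String := String.ofList (pvTitleChars false s.toList)

def letter_capitalization (string : String) : String :=
  let res := pvTitle string
  let token := "abcd"
  let result := res ++ token
  let res_list := result.toList
  let res_list' := (PySem.List.pyRange 3 (PySem.Str.len result) 4).foldl
      (fun l (i : Int) => l.set i.toNat '-') res_list
  String.ofList res_list'

-- ===== PORT B =====
-- the while loop of Source B: take a block of 4 while one exists (keep 3 chars, emit '-'), then the remainder unchanged
def pvChunk4 : List Char → List Char
  | a :: b :: c :: _ :: rest => a :: b :: c :: '-' :: pvChunk4 rest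
  | l => l

def letter_capitalization_alt (string : String) : String :=
  String.ofList (pvChunk4 (pvTitle string ++ "abcd").toList)

-- ===== PRECONDITION & SPEC =====
def Spec_letter_capitalization (string : String) (out : String) : Prop := out = letter_capitalization_alt string
instance (string : String) (out : String) : Decidable (Spec_letter_capitalization string out) := by unfold Spec_letter_capitalization; infer_instance

-- ===== CLAIM (what is proved, stated in full; the proofs are below) =====
def Claim_equal_letter_capitalization : Prop := ∀ (string : String), Dom_letter_capitalization string → Spec_letter_capitalization string (letter_capitalization string)

-- ===== LEMMAS AND PROOFS =====

theorem pyRange4_nil {n : Int} (h : n ≤ 3) : PySem.List.pyRange 3 n 4 = [] := by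
  rw [PySem.List.pyRange_of_pos _ _ (by norm_num)]
  rw [if_neg (by omega)]
  simp

theorem pyRange4_cons {n : Int} (h : 4 ≤ n) :
    PySem.List.pyRange 3 n 4 = 3 :: (PySem.List.pyRange 3 (n - 4) 4).map (· + 4) := by
  rw [PySem.List.pyRange_of_pos _ _ (by norm_num), PySem.List.pyRange_of_pos _ _ (by norm_num)]
  have h1 : (if (3:Int) < n then ((n - 3 + 4 - 1) / 4).toNat else 0) =
      ((if (3:Int) < n - 4 then ((n - 4 - 3 + 4 - 1) / 4).toNat else 0)) + 1 := by
    split_ifs <;> omega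
  rw [h1, List.range_succ_eq_map]
  simp only [List.map_cons, List.map_map]
  refine congrArg₂ (· :: ·) (by norm_num) ?_
  refine List.map_congr_left (fun k _ => ?_)
  simp only [Function.comp_apply]
  push_cast
  ring

theorem mem_pyRange4_nonneg {m i : Int} (hi : i ∈ PySem.List.pyRange 3 m 4) : 0 ≤ i := by
  rw [PySem.List.pyRange_of_pos _ _ (by norm_num)] at hi
  rcases List.mem_map.1 hi with ⟨k, _, rfl⟩
  positivity

theorem foldl_set_shift (idxs : List Int) (hnn : ∀ i ∈ idxs, 0 ≤ i) :
    ∀ (a b c e : Char) (tl : List Char),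
      (idxs.map (· + 4)).foldl (fun l (i : Int) => l.set i.toNat '-') (a :: b :: c :: e :: tl)
        = a :: b :: c :: e :: idxs.foldl (fun l (i : Int) => l.set i.toNat '-') tl := by
  induction idxs with
  | nil => intro a b c e tl; rfl
  | cons i rest ih =>
    intro a b c e tl
    have hi : 0 ≤ i := hnn i (by simp)
    have ht : (i + 4).toNat = i.toNat + 4 := by omega
    simp only [List.map_cons, List.foldl_cons, ht]
    have hset : (a :: b :: c :: e :: tl).set (i.toNat + 4) '-'
        = a :: b :: c :: e :: tl.set i.toNat '-' := by
      simp [List.set]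
    rw [hset, ih (fun j hj => hnn j (by simp [hj]))]

theorem foldl_set_eq_chunk4 (cs : List Char) :
    (PySem.List.pyRange 3 (cs.length : Int) 4).foldl (fun l (i : Int) => l.set i.toNat '-') cs
      = pvChunk4 cs := by
  match cs with
  | [] => simp [pyRange4_nil, pvChunk4]
  | [a] => simp [pyRange4_nil, pvChunk4]
  | [a, b] => simp [pyRange4_nil, pvChunk4]
  | [a, b, c] => simp [pyRange4_nil, pvChunk4]
  | a :: b :: c :: d :: tl =>
    have hlen : ((a :: b :: c :: d :: tl).length : Int) = (tl.length : Int) + 4 := by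
      simp; omega
    rw [hlen, pyRange4_cons (by omega)]
    have h4 : (tl.length : Int) + 4 - 4 = (tl.length : Int) := by ring
    rw [h4]
    simp only [List.foldl_cons]
    have hset : ((a :: b :: c :: d :: tl).set (Int.toNat 3) '-') = a :: b :: c :: '-' :: tl := by
      simp [List.set]
    rw [hset, foldl_set_shift _ (fun i hi => mem_pyRange4_nonneg hi),
      foldl_set_eq_chunk4 tl]
    rfl
termination_by cs.length

-- ===== VERDICT (by name: the statement is the Claim_ definition above) =====
theorem letter_capitalization_spec : Claim_equal_letter_capitalization := by
  intro string _
  unfold Spec_letter_capitalization letter_capitalization letter_capitalization_alt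
  have hlen : PySem.Str.len (pvTitle string ++ "abcd")
      = (((pvTitle string ++ "abcd").toList).length : Int) := by
    simp [PySem.Str.len_eq]
  simp only [hlen]
  rw [foldl_set_eq_chunk4]
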